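-- pv_equiv track=rewrite | github.com/wingedonezero/Video-Sync-GUI | vsg_core/subtitles/sync_mode_plugins/video_verified/candidates.py | generate_frame_candidates
-- ===== SOURCE A (Python) =====
-- def generate_frame_candidates(
--     correlation_frames: float, search_range_frames: int
-- ) -> list[int]:
--     """
--     Generate candidate frame offsets to test, centered on the correlation value.
--
--     This works for any offset size - small (< 3 frames) or large (24+ frames).
--     We search in a window around the correlation-derived frame offset.
--
--     Args:
--         correlation_frames: Audio correlation converted to frames (can be fractional)
--         search_range_frames: How many frames on each side to search
--
--     Returns:
--         Sorted list of integer frame offsets to test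
--     """
--     candidates = set()
--
--     # Round correlation to nearest frame
--     base_frame = int(round(correlation_frames))
--
--     # Always include zero (in case correlation is just wrong)
--     candidates.add(0)
--
--     # Search window around correlation
--     for delta in range(-search_range_frames, search_range_frames + 1):
--         candidates.add(base_frame + delta)
--
--     return sorted(candidates)
-- ===== SOURCE B (Python) =====
-- def generate_frame_candidates(
--     correlation_frames: float, search_range_frames: int
-- ) -> list[int]:
--     """Same result as A: build the contiguous sorted window directly and
--     place 0 by position instead of using a set + final sort."""
--     base_frame = int(round(correlation_frames))
--     if search_range_frames < 0:
--         return [0]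
--     lo = base_frame - search_range_frames
--     hi = base_frame + search_range_frames
--     frames = list(range(lo, hi + 1))
--     if lo > 0:
--         return [0] + frames
--     if hi < 0:
--         return frames + [0]
--     return frames
-- ===== Notes on version B (the rewrite author's own statement) =====
-- stated objective: simpler
-- what changed: Replaces the set-accumulation plus final sort with directly building the contiguous already-sorted range and prepending/appending 0 only when it falls outside the window.
import Mathlib
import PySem

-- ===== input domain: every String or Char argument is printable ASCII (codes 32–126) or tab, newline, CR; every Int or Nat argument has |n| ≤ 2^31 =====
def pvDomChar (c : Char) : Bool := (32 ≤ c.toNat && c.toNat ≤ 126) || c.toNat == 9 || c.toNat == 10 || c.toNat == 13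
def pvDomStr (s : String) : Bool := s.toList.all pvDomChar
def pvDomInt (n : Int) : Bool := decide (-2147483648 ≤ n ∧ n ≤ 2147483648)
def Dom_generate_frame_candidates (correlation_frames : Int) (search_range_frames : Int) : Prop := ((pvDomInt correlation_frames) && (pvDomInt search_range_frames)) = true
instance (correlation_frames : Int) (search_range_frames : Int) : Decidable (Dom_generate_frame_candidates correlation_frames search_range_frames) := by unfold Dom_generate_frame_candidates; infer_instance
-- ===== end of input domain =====

-- B builds the contiguous sorted window directly and places 0 by position; A accumulates a set and sorts it.

-- ===== PORT A =====
-- the set 'candidates' after A's loop: {0} then base_frame+delta for delta in range(-s, s+1)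
def pvCandidates (correlation_frames : Int) (search_range_frames : Int) : PySem.Set Int :=
  let base_frame := correlation_frames   -- int(round(x)) = x for an integer input
  let candidates := PySem.Set.add PySem.Set.empty 0
  (PySem.List.pyRange (-search_range_frames) (search_range_frames + 1) 1).foldl
    (fun acc delta => PySem.Set.add acc (base_frame + delta)) candidates

def generate_frame_candidates (correlation_frames : Int) (search_range_frames : Int) : List Int :=
  PySem.List.sorted (pvCandidates correlation_frames search_range_frames) (fun x => x) false

-- ===== PORT B =====
def generate_frame_candidates_alt (correlation_frames : Int) (search_range_frames : Int) : List Int :=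
  let base_frame := correlation_frames   -- int(round(x)) = x for an integer input
  if search_range_frames < 0 then [0]
  else
    let lo := base_frame - search_range_frames
    let hi := base_frame + search_range_frames
    let frames := PySem.List.pyRange lo (hi + 1) 1
    if 0 < lo then 0 :: frames
    else if hi < 0 then frames ++ [0]
    else frames

-- ===== PRECONDITION & SPEC =====
def Spec_generate_frame_candidates (correlation_frames : Int) (search_range_frames : Int) (out : List Int) : Prop := out = generate_frame_candidates_alt correlation_frames search_range_frames
instance (correlation_frames : Int) (search_range_frames : Int) (out : List Int) : Decidable (Spec_generate_frame_candidates correlation_frames search_range_frames out) := by unfold Spec_generate_frame_candidates; infer_instance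

-- ===== CLAIM (what is proved, stated in full; the proofs are below) =====
def Claim_equal_generate_frame_candidates : Prop := ∀ (correlation_frames : Int) (search_range_frames : Int), Dom_generate_frame_candidates correlation_frames search_range_frames → Spec_generate_frame_candidates correlation_frames search_range_frames (generate_frame_candidates correlation_frames search_range_frames)

-- ===== LEMMAS AND PROOFS =====

theorem mem_pvCandidates (c s y : Int) :
    y ∈ pvCandidates c s ↔ y = 0 ∨ (c - s ≤ y ∧ y ≤ c + s) := by
  unfold pvCandidates
  rw [PySem.Set.mem_foldl_add]
  simp [PySem.List.mem_pyRange_one, PySem.Set.empty]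
  constructor
  · rintro (h | ⟨d, ⟨h1, h2⟩, rfl⟩)
    · exact Or.inl h
    · exact Or.inr ⟨by omega, by omega⟩
  · rintro (h | ⟨h1, h2⟩)
    · exact Or.inl h
    · exact Or.inr ⟨y - c, ⟨by omega, by omega⟩, by ring⟩

theorem nodup_pvCandidates (c s : Int) : (pvCandidates c s).Nodup := by
  unfold pvCandidates
  rw [← PySem.Set.update_map_eq_foldl_add]
  exact PySem.Set.nodup_update _ _ (by decide)

theorem mem_alt (c s y : Int) :
    y ∈ generate_frame_candidates_alt c s ↔ y = 0 ∨ (c - s ≤ y ∧ y ≤ c + s) := by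
  simp only [generate_frame_candidates_alt]
  split_ifs with h1 h2 h3 <;>
    (try simp [PySem.List.mem_pyRange_one]) <;> omega

theorem pairwise_alt (c s : Int) :
    (generate_frame_candidates_alt c s).Pairwise (· < ·) := by
  simp only [generate_frame_candidates_alt]
  split_ifs with h1 h2 h3
  · simp
  · refine List.Pairwise.cons ?_ (PySem.List.pairwise_lt_pyRange_one _ _)
    intro x hx
    rw [PySem.List.mem_pyRange_one] at hx
    omega
  · rw [List.pairwise_append]
    refine ⟨PySem.List.pairwise_lt_pyRange_one _ _, by simp, ?_⟩
    intro x hx y hy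
    rw [PySem.List.mem_pyRange_one] at hx
    simp at hy
    omega
  · exact PySem.List.pairwise_lt_pyRange_one _ _

theorem nodup_alt (c s : Int) : (generate_frame_candidates_alt c s).Nodup :=
  (pairwise_alt c s).imp (fun h => ne_of_lt h)

-- ===== VERDICT (by name: the statement is the Claim_ definition above) =====
theorem generate_frame_candidates_spec : Claim_equal_generate_frame_candidates := by
  intro c s _
  unfold Spec_generate_frame_candidates generate_frame_candidates
  refine PySem.List.sorted_eq_of_perm_of_pairwise_lt _ _ _ ?_ (pairwise_alt c s)
  refine (List.perm_ext_iff_of_nodup (nodup_alt c s) (nodup_pvCandidates c s)).mpr ?_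
  intro y
  rw [mem_alt, mem_pvCandidates]
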